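-- pv_equiv track=rewrite | github.com/tcoard/650_final_proj | prot_bert/protbert_embeddings_evaluation.py | filter_embeddings
-- ===== SOURCE A (Python) =====
-- MIN_DRUG_RES = 50
--
-- def filter_embeddings(header_emb):
--     res_count = dict()
--     for header in header_emb:
--         res = header.split("|")[-1]
--         if res_count.get(res) is None:
--             res_count[res] = 1
--         else:
--             res_count[res] += 1
--
--     res_to_keep = sorted(filter(lambda res: res_count[res] > MIN_DRUG_RES, list(res_count)))
--     for header in list(header_emb):
--         res = header.split("|")[-1]
--         if res not in res_to_keep:
--             del header_emb[header]
--     return header_emb, res_to_keep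
-- ===== SOURCE B (Python) =====
-- MIN_DRUG_RES = 50
--
-- def filter_embeddings(header_emb):
--     # Sort the residues and find over-threshold residues by scanning runs of
--     # equal neighbours (no counting dict); the keep-list comes out sorted.
--     residues = sorted(h.split("|")[-1] for h in header_emb)
--     res_to_keep = []
--     cur = None
--     cnt = 0
--     for r in residues:
--         if r == cur:
--             cnt += 1
--         else:
--             if cnt > MIN_DRUG_RES:
--                 res_to_keep.append(cur)
--             cur = r
--             cnt = 1
--     if cnt > MIN_DRUG_RES:
--         res_to_keep.append(cur)
--     keep = set(res_to_keep)
--     kept = {h: v for h, v in header_emb.items() if h.split("|")[-1] in keep}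
--     header_emb.clear()
--     header_emb.update(kept)
--     return header_emb, res_to_keep
-- ===== Notes on version B (the rewrite author's own statement) =====
-- stated objective: alternative
-- what changed: B replaces A's hash-counting dict and key-deleting second pass by sort-then-run-scan: it sorts the residues, collects the residues whose run of equal neighbours exceeds the threshold (already in sorted order, so no final sort), and rebuilds the dict in one filtering pass with a keep-set.
import Mathlib
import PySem

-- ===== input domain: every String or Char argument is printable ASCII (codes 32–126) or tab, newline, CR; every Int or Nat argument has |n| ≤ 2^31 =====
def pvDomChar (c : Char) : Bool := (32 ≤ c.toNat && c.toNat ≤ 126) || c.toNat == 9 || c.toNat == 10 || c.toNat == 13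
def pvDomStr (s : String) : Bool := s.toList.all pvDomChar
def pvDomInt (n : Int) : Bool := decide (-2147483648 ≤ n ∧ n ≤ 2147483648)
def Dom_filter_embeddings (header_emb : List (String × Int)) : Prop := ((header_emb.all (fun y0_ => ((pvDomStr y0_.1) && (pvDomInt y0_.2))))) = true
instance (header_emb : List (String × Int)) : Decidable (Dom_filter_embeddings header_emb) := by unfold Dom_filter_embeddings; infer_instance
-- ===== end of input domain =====

-- B sorts the residues and scans runs of equal neighbours instead of hash-counting, then rebuilds
-- the dict in one filtering pass (clear+update on the same object, so A's in-place mutation is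
-- preserved); equivalence is proved on return values.

-- ===== PORT A =====
-- header.split("|")[-1]: the separator "|" is non-empty, so split? always returns some nonempty
-- list and the two defaults below are unreachable (exact).
def resOf (h : String) : String :=
  PySem.List.pyGetD ((PySem.Str.split? h "|").getD []) (-1) ""

def filter_embeddings (header_emb : List (String × Int)) : (List (String × Int)) × List String :=
  let res_count : PySem.Dict String Int :=
    header_emb.foldl (fun d p =>
      match d.get? (resOf p.1) with
      | none => d.insert (resOf p.1) 1
      | some c => d.insert (resOf p.1) (c + 1)) PySem.Dict.empty
  let res_to_keep : List String :=
    PySem.List.sorted ((PySem.Dict.keys res_count).filter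
      (fun r => decide (res_count.getD r 0 > 50))) (fun x => x) false
  -- 'del header_emb[header]' removes the entry with that key; the key is unique in the dict
  -- (Pre_ excludes duplicate-key lists), so erasing the first match is exact and no KeyError occurs.
  let result : List (String × Int) :=
    header_emb.foldl (fun acc p =>
      if (res_to_keep.contains (resOf p.1)) then acc
      else acc.eraseP (fun q => q.1 == p.1)) header_emb
  (result, res_to_keep)

-- ===== PORT B =====
-- loop state = (cur, cnt, res_to_keep); cur is None (none) only before the first element, so the
-- "" default of '.getD' is never the value appended (cnt > 50 forces cur to have been set).
def filter_embeddings_alt (header_emb : List (String × Int)) : (List (String × Int)) × List String :=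
  let residues : List String :=
    PySem.List.sorted (header_emb.map (fun p => resOf p.1)) (fun x => x) false
  let st : Option String × Int × List String :=
    residues.foldl (fun st r =>
      if some r == st.1 then (st.1, st.2.1 + 1, st.2.2)
      else if st.2.1 > 50 then (some r, 1, st.2.2 ++ [st.1.getD ""])
      else (some r, 1, st.2.2)) (none, 0, [])
  let res_to_keep : List String :=
    if st.2.1 > 50 then st.2.2 ++ [st.1.getD ""] else st.2.2
  let keep : PySem.Set String := PySem.Set.ofList res_to_keep
  let kept : List (String × Int) :=
    header_emb.filter (fun p => PySem.Set.contains keep (resOf p.1))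
  (kept, res_to_keep)

-- ===== PRECONDITION & SPEC =====
-- Pre_ excludes association lists with a duplicated key: they do not represent any Python dict
-- (every real input is a dict, whose keys are unique), and on them A's snapshot loop would
-- attempt 'del header_emb[header]' twice for the same key, a KeyError.
def Pre_filter_embeddings (header_emb : List (String × Int)) : Prop :=
  (header_emb.map Prod.fst).Nodup
instance (header_emb : List (String × Int)) : Decidable (Pre_filter_embeddings header_emb) := by
  unfold Pre_filter_embeddings; infer_instance
def pvWitness_filter_embeddings : (List (String × Int)) := [("ab|r1", 3), ("cd|r2", -1)]
def Spec_filter_embeddings (header_emb : List (String × Int)) (out : (List (String × Int)) × List String) : Prop := out = filter_embeddings_alt header_emb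
instance (header_emb : List (String × Int)) (out : (List (String × Int)) × List String) : Decidable (Spec_filter_embeddings header_emb out) := by unfold Spec_filter_embeddings; infer_instance

-- ===== CLAIM (what is proved, stated in full; the proofs are below) =====
def Claim_equal_filter_embeddings : Prop := ∀ (header_emb : List (String × Int)), Dom_filter_embeddings header_emb → Pre_filter_embeddings header_emb → Spec_filter_embeddings header_emb (filter_embeddings header_emb)

-- ===== LEMMAS AND PROOFS =====

-- A's counter step is the standard 'd[r] = d.get(r, 0) + 1' step, so A's first loop is Counter(residues)
theorem counter_fold_eq (he : List (String × Int)) :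
    he.foldl (fun d p =>
      match d.get? (resOf p.1) with
      | none => d.insert (resOf p.1) 1
      | some c => d.insert (resOf p.1) (c + 1)) (PySem.Dict.empty : PySem.Dict String Int)
    = PySem.Dict.counter (he.map (fun p => resOf p.1)) := by
  have hstep : (fun (d : PySem.Dict String Int) (p : String × Int) =>
      match d.get? (resOf p.1) with
      | none => d.insert (resOf p.1) 1
      | some c => d.insert (resOf p.1) (c + 1))
      = fun d p => d.insert (resOf p.1) (d.getD (resOf p.1) 0 + 1) := by
    funext d p
    cases h : d.get? (resOf p.1) <;> simp [PySem.Dict.getD_eq_get?_getD, h]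
  have hmap : he.foldl (fun (d : PySem.Dict String Int) p => d.insert (resOf p.1) (d.getD (resOf p.1) 0 + 1)) PySem.Dict.empty
      = (he.map (fun p => resOf p.1)).foldl (fun d x => d.insert x (d.getD x 0 + 1)) PySem.Dict.empty := by
    simp only [List.foldl_map]
  rw [hstep, hmap, PySem.Dict.foldl_insert_getD_add_one_eq_counter]

-- reference form of B's run scan (proved equal to B's foldl below)
def runsRef (c : String) (n : Int) : List String → List String
  | [] => if n > 50 then [c] else []
  | x :: T => if x = c then runsRef c (n + 1) T
      else (if n > 50 then [c] else []) ++ runsRef x 1 T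

def runStep (st : Option String × Int × List String) (r : String) : Option String × Int × List String :=
  if some r == st.1 then (st.1, st.2.1 + 1, st.2.2)
  else if st.2.1 > 50 then (some r, 1, st.2.2 ++ [st.1.getD ""])
  else (some r, 1, st.2.2)

-- B's fold, started at a seen element, finalized, is the reference run scan
theorem fold_runs (S : List String) : ∀ (c : String) (n : Int) (acc : List String),
    (let st := S.foldl runStep (some c, n, acc);
     if st.2.1 > 50 then st.2.2 ++ [st.1.getD ""] else st.2.2)
    = acc ++ runsRef c n S := by
  induction S with
  | nil =>
    intro c n acc
    simp only [List.foldl_nil, runsRef]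
    split <;> simp
  | cons x T ih =>
    intro c n acc
    by_cases hx : x = c
    · have hstep : runStep (some c, n, acc) x = (some c, n + 1, acc) := by
        simp [runStep, hx]
      simp only [List.foldl_cons, hstep, runsRef, if_pos hx, ih]
    · have hb : (some x == some c) = false := by simp [hx]
      by_cases hn : n > 50
      · have hstep : runStep (some c, n, acc) x = (some x, 1, acc ++ [c]) := by
          simp [runStep, hb, hn]
        simp only [List.foldl_cons, hstep, runsRef, if_neg hx, if_pos hn, ih,
          List.append_assoc, List.singleton_append]
      · have hstep : runStep (some c, n, acc) x = (some x, 1, acc) := by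
          simp [runStep, hb, hn]
        simp only [List.foldl_cons, hstep, runsRef, if_neg hx, if_neg hn, ih]
        simp
-- B's whole scan from the initial (None, 0, []) state
theorem scan_eq (S : List String) :
    (let st := S.foldl runStep ((none : Option String), 0, ([] : List String));
     if st.2.1 > 50 then st.2.2 ++ [st.1.getD ""] else st.2.2)
    = match S with | [] => [] | x :: T => runsRef x 1 T := by
  cases S with
  | nil => simp
  | cons x T =>
    have hstep : runStep (none, 0, []) x = (some x, 1, []) := by
      simp [runStep]
    simp only [List.foldl_cons, hstep, fold_runs, List.nil_append]

-- membership in the run scan of a sorted tail: exactly the residues whose total count exceeds 50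
theorem mem_runsRef (S : List String) : ∀ (c : String) (n : Int) (r : String),
    S.Pairwise (· ≤ ·) → (∀ y ∈ S, c ≤ y) →
    (r ∈ runsRef c n S ↔
      (r = c ∧ n + (S.count c : Int) > 50) ∨ (r ≠ c ∧ r ∈ S ∧ ((S.count r : Int) > 50))) := by
  induction S with
  | nil =>
    intro c n r _ _
    simp only [runsRef, List.count_nil, List.not_mem_nil]
    split <;> simp_all
  | cons x T ih =>
    intro c n r hpw hc
    have hTpw : T.Pairwise (· ≤ ·) := hpw.of_cons
    have hxT : ∀ y ∈ T, x ≤ y := fun y hy => List.rel_of_pairwise_cons hpw hy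
    by_cases hx : x = c
    · subst hx
      rw [runsRef, if_pos rfl, ih x (n + 1) r hTpw hxT]
      simp only [List.count_cons, beq_iff_eq, List.mem_cons]
      by_cases hrx : r = x
      · subst hrx
        simp only [true_and, ne_eq, not_true_eq_false, false_and, or_false]
        push_cast
        constructor <;> (intro h; omega)
      · have hxr : ¬ x = r := fun h => hrx h.symm
        simp [hrx, hxr]
    · have hcx : c < x := lt_of_le_of_ne (hc x (List.mem_cons_self)) (fun h => hx h.symm)
      have hcnT : c ∉ T := fun h => absurd (hxT c h) (not_le.mpr hcx)
      have hcount0 : (x :: T).count c = 0 := by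
        apply List.count_eq_zero.mpr
        simp only [List.mem_cons, not_or]
        exact ⟨fun h => hx h.symm, hcnT⟩
      rw [runsRef, if_neg hx, List.mem_append, ih x 1 r hTpw hxT, hcount0]
      by_cases hrc : r = c
      · subst hrc
        have hrx : ¬ r = x := fun h => hx h.symm
        have hxr : ¬ x = r := fun h => hx h
        simp only [List.count_cons, beq_iff_eq, List.mem_cons, hrx, hxr, hcnT,
          if_false, false_and, and_false, or_false, ne_eq, not_true_eq_false]
        split <;> simp_all
      · by_cases hrx : r = x
        · subst hrx
          have hmem : r ∉ (if n > 50 then [c] else []) := by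
            split <;> simp [hrc]
          simp only [List.count_cons, beq_iff_eq, List.mem_cons, hmem, false_or,
            ne_eq, hrc, not_false_eq_true, true_and, not_true_eq_false,
            false_and, or_false, true_or]
          push_cast
          constructor <;> (intro h; omega)
        · have hmem : r ∉ (if n > 50 then [c] else []) := by
            split <;> simp [hrc]
          have hxr : ¬ x = r := fun h => hrx h.symm
          simp only [List.count_cons, beq_iff_eq, List.mem_cons, hmem, false_or,
            ne_eq, hrc, hrx, hxr, not_false_eq_true, true_and, if_false, false_and,
            false_or, add_zero]

-- the run scan of a sorted tail is strictly increasing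
theorem pairwise_runsRef (S : List String) : ∀ (c : String) (n : Int),
    S.Pairwise (· ≤ ·) → (∀ y ∈ S, c ≤ y) →
    (runsRef c n S).Pairwise (· < ·) := by
  induction S with
  | nil =>
    intro c n _ _
    rw [runsRef]; split <;> simp
  | cons x T ih =>
    intro c n hpw hc
    have hTpw : T.Pairwise (· ≤ ·) := hpw.of_cons
    have hxT : ∀ y ∈ T, x ≤ y := fun y hy => List.rel_of_pairwise_cons hpw hy
    by_cases hx : x = c
    · subst hx
      rw [runsRef, if_pos rfl]
      exact ih x (n + 1) hTpw hxT
    · have hcx : c < x := lt_of_le_of_ne (hc x (List.mem_cons_self)) (fun h => hx h.symm)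
      rw [runsRef, if_neg hx]
      apply List.pairwise_append.mpr
      refine ⟨by split <;> simp, ih x 1 hTpw hxT, ?_⟩
      intro a ha b hb
      have hac : a = c := by split at ha <;> simp_all
      subst hac
      rcases (mem_runsRef T x 1 b hTpw hxT).mp hb with ⟨h1, _⟩ | ⟨_, h2, _⟩
      · exact h1 ▸ hcx
      · exact lt_of_lt_of_le hcx (hxT b h2)

-- A's sorted filtered counter keys = B's run scan of the sorted residue list
theorem keep_eq (he : List (String × Int)) :
    PySem.List.sorted (((PySem.Dict.counter (he.map (fun p => resOf p.1))).keys).filter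
      (fun r => decide ((PySem.Dict.counter (he.map (fun p => resOf p.1))).getD r 0 > 50))) (fun x => x) false
    = (let st := (PySem.List.sorted (he.map (fun p => resOf p.1)) (fun x => x) false).foldl
          runStep ((none : Option String), 0, ([] : List String));
       if st.2.1 > 50 then st.2.2 ++ [st.1.getD ""] else st.2.2) := by
  set R := he.map (fun p => resOf p.1) with hR
  set S := PySem.List.sorted R (fun x => x) false with hS
  have hperm : S.Perm R := PySem.List.sorted_perm R (fun x => x) false
  have hSpw : S.Pairwise (· ≤ ·) := PySem.List.sorted_pairwise R (fun x => x)
  rw [scan_eq]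
  -- the scan result K
  set K := (match S with | [] => [] | x :: T => runsRef x 1 T) with hK
  have hKpw : K.Pairwise (· < ·) := by
    rw [hK]
    cases hS' : S with
    | nil => simp
    | cons x T =>
      rw [hS'] at hSpw
      exact pairwise_runsRef T x 1 hSpw.of_cons (fun y hy => List.rel_of_pairwise_cons hSpw hy)
  have hKmem : ∀ r, r ∈ K ↔ 50 < S.count r := by
    intro r
    rw [hK]
    cases hS' : S with
    | nil => simp
    | cons x T =>
      rw [hS'] at hSpw
      rw [mem_runsRef T x 1 r hSpw.of_cons (fun y hy => List.rel_of_pairwise_cons hSpw hy)]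
      constructor
      · rintro (⟨h1, h2⟩ | ⟨h1, h2, h3⟩)
        · subst h1; rw [List.count_cons_self]; omega
        · rw [List.count_cons_of_ne (Ne.symm h1)]; omega
      · intro h
        by_cases hrx : r = x
        · subst hrx
          rw [List.count_cons_self] at h
          exact Or.inl ⟨rfl, by omega⟩
        · rw [List.count_cons_of_ne (Ne.symm hrx)] at h
          have hmem : r ∈ T := List.count_pos_iff.mp (by omega)
          exact Or.inr ⟨hrx, hmem, by omega⟩
  -- the A-side list
  have hxs : ((PySem.Dict.counter R).keys).filter
      (fun r => decide ((PySem.Dict.counter R).getD r 0 > 50))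
      = (PySem.Set.ofList R).filter (fun r => decide (50 < (R.count r : Int))) := by
    rw [PySem.Dict.keys_counter]
    apply List.filter_congr
    intro r _
    rw [PySem.Dict.getD_counter]
  rw [hxs]
  apply PySem.List.sorted_eq_of_perm_of_pairwise_lt
  · -- K is a permutation of the filtered set
    apply (List.perm_ext_iff_of_nodup hKpw.nodup (List.Nodup.filter _ (PySem.Set.nodup_ofList R))).mpr
    intro r
    rw [hKmem r, List.mem_filter]
    have hcnt : S.count r = R.count r := hperm.count_eq r
    constructor
    · intro h
      refine ⟨(PySem.Set.mem_ofList R r).mpr ?_, by rw [← hcnt]; simp; exact_mod_cast h⟩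
      exact List.count_pos_iff.mp (by omega)
    · rintro ⟨_, h2⟩
      simp at h2
      rw [hcnt]; exact_mod_cast h2
  · simpa using hKpw

-- erasing the first pair with a given key from a nodup-key list = dropping all pairs with that key
theorem eraseP_key_eq_filter (k : String) :
    ∀ (d : List (String × Int)), (d.map Prod.fst).Nodup →
      d.eraseP (fun q => q.1 == k) = d.filter (fun q => !(q.1 == k)) := by
  intro d
  induction d with
  | nil => intro _; rfl
  | cons q d ih =>
    intro hnd
    simp only [List.map_cons, List.nodup_cons] at hnd
    by_cases hq : q.1 = k
    · have : d.filter (fun q => !(q.1 == k)) = d := by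
        apply List.filter_eq_self.mpr
        intro a ha
        simp only [Bool.not_eq_eq_eq_not, Bool.not_true, beq_eq_false_iff_ne]
        intro hak
        have : a.1 ∈ d.map Prod.fst := List.mem_map_of_mem ha
        rw [hak, ← hq] at this
        exact hnd.1 this
      simp [hq, this]
    · simp [hq, ih hnd.2]

-- A's delete loop over a snapshot of the keys, as a filter
theorem foldl_del (Q : String → Bool) :
    ∀ (xs d : List (String × Int)), (d.map Prod.fst).Nodup →
      xs.foldl (fun acc p => if Q p.1 then acc else acc.eraseP (fun q => q.1 == p.1)) d
        = d.filter (fun q => Q q.1 || decide (q.1 ∉ xs.map Prod.fst)) := by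
  intro xs
  induction xs with
  | nil =>
    intro d _
    simp
  | cons p xs ih =>
    intro d hnd
    by_cases hp : Q p.1 = true
    · rw [List.foldl_cons]
      simp only [hp, if_true]
      rw [ih d hnd]
      apply List.filter_congr
      intro q _
      by_cases hq : q.1 = p.1
      · simp [hq, hp]
      · have hb : (q.1 == p.1) = false := beq_eq_false_iff_ne.mpr hq
        simp [hq, hb]
    · rw [List.foldl_cons]
      rw [if_neg hp]
      rw [eraseP_key_eq_filter p.1 d hnd]
      have hnd' : ((d.filter (fun q => !(q.1 == p.1))).map Prod.fst).Nodup :=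
        ((List.filter_sublist (l := d)).map Prod.fst).nodup hnd
      rw [ih _ hnd', List.filter_filter]
      apply List.filter_congr
      intro q _
      by_cases hq : q.1 = p.1
      · simp [hq, hp]
      · have hb : (q.1 == p.1) = false := beq_eq_false_iff_ne.mpr hq
        simp [hq, hb]

-- the delete loop keeps exactly the headers whose residue is in K (every key is in the snapshot)
theorem result_eq (he : List (String × Int)) (K : List String)
    (hpre : (he.map Prod.fst).Nodup) :
    he.foldl (fun acc p => if K.contains (resOf p.1) then acc
        else acc.eraseP (fun q => q.1 == p.1)) he
      = he.filter (fun p => PySem.Set.contains (PySem.Set.ofList K) (resOf p.1)) := by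
  rw [foldl_del (fun s => K.contains (resOf s)) he he hpre]
  apply List.filter_congr
  intro q hq
  have hm : decide (q.1 ∉ he.map Prod.fst) = false := by
    simp [List.mem_map_of_mem hq]
  simp [hm, PySem.Set.contains]

-- ===== VERDICT (by name: the statement is the Claim_ definition above) =====
theorem filter_embeddings_spec : Claim_equal_filter_embeddings := by
  intro he _ hpre
  unfold Spec_filter_embeddings filter_embeddings filter_embeddings_alt
  dsimp only
  rw [counter_fold_eq]
  rw [show (fun (st : Option String × Int × List String) (r : String) =>
      if some r == st.1 then (st.1, st.2.1 + 1, st.2.2)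
      else if st.2.1 > 50 then (some r, (1:Int), st.2.2 ++ [st.1.getD ""])
      else (some r, 1, st.2.2)) = runStep from rfl]
  rw [keep_eq he, result_eq he _ hpre]
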